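-- pv_equiv track=rewrite | github.com/1Jayakrishnan/GFG--POTD | JUNE 2024/Maximum occured integer.py | maxOccured
-- ===== SOURCE A (Python) =====
-- def maxOccured(n, l, r, maxx):
--     # Create the frequency array with an additional space
--     freq = [0] * (maxx + 2)
--
--     # Mark the start and end+1 of each range
--     for i in range(n):
--         freq[l[i]] += 1
--         freq[r[i] + 1] -= 1
--
--     # Compute the prefix sum to get the frequency of each integer
--     max_count = 0
--     max_occured = -1
--     current_count = 0
--
--     for i in range(maxx + 1):
--         current_count += freq[i]
--         if current_count > max_count:
--             max_count = current_count
--             max_occured = i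
--
--     return max_occured
-- ===== SOURCE B (Python) =====
-- def maxOccured(n, l, r, maxx):
--     # Event sweep: +1 at each range start, -1 just past each range end;
--     # sort events, then scan once, checking a candidate at the last event
--     # of each coordinate group.
--     events = []
--     for i in range(n):
--         events.append((l[i], 1))
--         events.append((r[i] + 1, -1))
--     events.sort(key=lambda e: e[0])
--     best = 0
--     ans = -1
--     cur = 0
--     for j, (x, d) in enumerate(events):
--         cur += d
--         if (j + 1 == len(events) or events[j + 1][0] != x) \
--                 and 0 <= x <= maxx and cur > best:
--             best = cur
--             ans = x
--     return ans
-- ===== Notes on version B (the rewrite author's own statement) =====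
-- stated objective: alternative
-- what changed: Replaces A's size-(maxx+2) difference array plus full prefix-sum scan over 0..maxx with an event list of 2n (coordinate, +/-1) pairs that is sorted and swept once, checking a candidate only at each distinct event coordinate.
-- outside the precondition, e.g. on maxOccured(1, [-2], [2], 2): A returns 2, B returns -1; on maxOccured(2, [0], [0], 3): A raises IndexError, B raises IndexError; on maxOccured(1, [9], [8], 3): A raises IndexError, B returns -1
import Mathlib
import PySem

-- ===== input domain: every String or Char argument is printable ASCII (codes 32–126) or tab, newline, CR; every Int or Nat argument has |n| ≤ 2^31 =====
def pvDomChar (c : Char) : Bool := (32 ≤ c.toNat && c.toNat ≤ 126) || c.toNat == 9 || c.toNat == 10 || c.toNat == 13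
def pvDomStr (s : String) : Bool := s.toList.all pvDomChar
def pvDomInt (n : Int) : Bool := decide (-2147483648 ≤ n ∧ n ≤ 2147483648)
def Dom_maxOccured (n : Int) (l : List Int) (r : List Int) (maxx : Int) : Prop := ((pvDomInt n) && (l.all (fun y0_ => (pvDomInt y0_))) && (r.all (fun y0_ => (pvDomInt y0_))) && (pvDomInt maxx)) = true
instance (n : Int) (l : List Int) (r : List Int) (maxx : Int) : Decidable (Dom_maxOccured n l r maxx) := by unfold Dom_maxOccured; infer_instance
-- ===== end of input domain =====

-- B replaces A's difference array + full 0..maxx prefix scan by a sorted event sweep (alternative algorithm; same results on Pre_).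


-- ===== PORT A =====
-- literal port of A: build the difference array freq, then prefix-sum over 0..maxx
-- (pyGetD/pySetD are exact on Pre_, where every index is in range and non-negative)
def maxOccured (n : Int) (l : List Int) (r : List Int) (maxx : Int) : Int :=
  let freq : List Int := List.replicate (maxx + 2).toNat 0
  let freq := (PySem.List.pyRange 0 n 1).foldl (fun f i =>
      let p := PySem.List.pyGetD l i 0
      let f := PySem.List.pySetD f p (PySem.List.pyGetD f p 0 + 1)
      let q := PySem.List.pyGetD r i 0 + 1
      PySem.List.pySetD f q (PySem.List.pyGetD f q 0 - 1)) freq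
  let st := (PySem.List.pyRange 0 (maxx + 1) 1).foldl
      (fun (st : Int × Int × Int) i =>
        let c := st.2.2 + PySem.List.pyGetD freq i 0
        if st.1 < c then (c, i, c) else (st.1, st.2.1, c)) (0, -1, 0)
  st.2.1

-- ===== PORT B =====
-- port of Source B's sweep loop: cur accumulates deltas; at the last event of a
-- coordinate group (lookahead at the next event) the coordinate is a candidate
def pvGroupEnd (x : Int) : List (Int × Int) → Bool
  | [] => true
  | e :: _ => e.1 != x

def pvSweep (maxx : Int) : List (Int × Int) → Int → Int → Int → Int
  | [], _, _, ans => ans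
  | (x, d) :: rest, cur, best, ans =>
    let cur' := cur + d
    if pvGroupEnd x rest && decide (0 ≤ x) && decide (x ≤ maxx) && decide (best < cur')
    then pvSweep maxx rest cur' cur' x
    else pvSweep maxx rest cur' best ans

def maxOccured_alt (n : Int) (l : List Int) (r : List Int) (maxx : Int) : Int :=
  let events := (PySem.List.pyRange 0 n 1).foldl (fun acc i =>
      (acc ++ [(PySem.List.pyGetD l i 0, (1 : Int))]) ++ [(PySem.List.pyGetD r i 0 + 1, (-1 : Int))]) []
  let es := PySem.List.sorted events (fun e => e.1) false
  pvSweep maxx es 0 0 (-1)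

-- ===== PRECONDITION & SPEC =====
-- Pre_ excludes inputs on which A's list indexing raises IndexError (n beyond a
-- list's length, or a range endpoint putting l[i] or r[i]+1 outside freq) and
-- inputs with negative range endpoints, which are outside this task's natural
-- domain of ranges over 0..maxx (there A silently wraps to an index near maxx
-- via Python's negative indexing).
def Pre_maxOccured (n : Int) (l : List Int) (r : List Int) (maxx : Int) : Prop :=
  n ≤ l.length ∧ n ≤ r.length ∧
  ∀ i ∈ PySem.List.pyRange 0 n 1,
    0 ≤ PySem.List.pyGetD l i 0 ∧ PySem.List.pyGetD l i 0 ≤ maxx + 1 ∧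
    -1 ≤ PySem.List.pyGetD r i 0 ∧ PySem.List.pyGetD r i 0 ≤ maxx
instance (n : Int) (l : List Int) (r : List Int) (maxx : Int) : Decidable (Pre_maxOccured n l r maxx) := by unfold Pre_maxOccured; infer_instance

def pvWitness_maxOccured : Int × List Int × List Int × Int := (3, [1, 2, 1], [3, 4, 2], 5)

def Spec_maxOccured (n : Int) (l : List Int) (r : List Int) (maxx : Int) (out : Int) : Prop := out = maxOccured_alt n l r maxx
instance (n : Int) (l : List Int) (r : List Int) (maxx : Int) (out : Int) : Decidable (Spec_maxOccured n l r maxx out) := by unfold Spec_maxOccured; infer_instance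

-- ===== CLAIM (what is proved, stated in full; the proofs are below) =====
def Claim_equal_maxOccured : Prop := ∀ (n : Int) (l : List Int) (r : List Int) (maxx : Int), Dom_maxOccured n l r maxx → Pre_maxOccured n l r maxx → Spec_maxOccured n l r maxx (maxOccured n l r maxx)

-- ===== LEMMAS AND PROOFS =====

-- abbreviations for the data both ports read
def pvLi (l : List Int) (i : Int) : Int := PySem.List.pyGetD l i 0
def pvQ (r : List Int) (i : Int) : Int := PySem.List.pyGetD r i 0 + 1

-- per-index bounds that Pre_ grants
def pvInB (l r : List Int) (maxx i : Int) : Prop :=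
  0 ≤ pvLi l i ∧ pvLi l i ≤ maxx + 1 ∧ 0 ≤ pvQ r i ∧ pvQ r i ≤ maxx + 1

-- net delta stored at coordinate x by the difference array
def pvDelta (l r : List Int) (I : List Int) (x : Int) : Int :=
  (I.map (fun i => (if pvLi l i = x then (1:Int) else 0) - (if pvQ r i = x then (1:Int) else 0))).sum

-- the prefix-sum value at x (number of started minus ended ranges)
def pvCs (l r : List Int) (I : List Int) (x : Int) : Int :=
  (I.map (fun i => (if pvLi l i ≤ x then (1:Int) else 0) - (if pvQ r i ≤ x then (1:Int) else 0))).sum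

-- sum of deltas of events with coordinate ≤ x
def pvT (es : List (Int × Int)) (x : Int) : Int :=
  ((es.filter (fun e => decide (e.1 ≤ x))).map Prod.snd).sum

-- the flat event list B builds
def pvFlat (l r : List Int) (I : List Int) : List (Int × Int) :=
  I.flatMap (fun i => [(pvLi l i, (1:Int)), (pvQ r i, (-1:Int))])

-- distinct coordinates of a (sorted) event list, taken at each group end
def pvCoords : List (Int × Int) → List Int
  | [] => []
  | (x, _) :: rest => if pvGroupEnd x rest then x :: pvCoords rest else pvCoords rest

-- the common record-update step
def pvStep (maxx : Int) (Cf : Int → Int) (st : Int × Int) (x : Int) : Int × Int :=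
  if 0 ≤ x ∧ x ≤ maxx ∧ st.1 < Cf x then (Cf x, x) else st

-- ---------- small sum lemmas ----------
lemma pvCs_neg (l r : List Int) (maxx : Int) (I : List Int)
    (hb : ∀ i ∈ I, pvInB l r maxx i) : pvCs l r I (-1) = 0 := by
  revert hb
  induction I with
  | nil => intro _; rfl
  | cons i t ih =>
    intro hb
    obtain ⟨h1, h2, h3, h4⟩ := hb i (by simp)
    have ht := ih (fun j hj => hb j (by simp [hj]))
    unfold pvCs at *
    simp only [List.map_cons, List.sum_cons]
    rw [if_neg (by omega), if_neg (by omega), ht]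
    ring

lemma pvCs_succ (l r : List Int) (I : List Int) (x : Int) :
    pvCs l r I x = pvCs l r I (x - 1) + pvDelta l r I x := by
  induction I with
  | nil => rfl
  | cons i t ih =>
    unfold pvCs pvDelta at *
    simp only [List.map_cons, List.sum_cons]
    have h : ((if pvLi l i ≤ x then (1:Int) else 0) - (if pvQ r i ≤ x then (1:Int) else 0))
        = ((if pvLi l i ≤ x - 1 then (1:Int) else 0) - (if pvQ r i ≤ x - 1 then (1:Int) else 0))
          + ((if pvLi l i = x then (1:Int) else 0) - (if pvQ r i = x then (1:Int) else 0)) := by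
      split_ifs <;> omega
    omega

lemma pvDelta_zero (l r : List Int) (I : List Int) (x : Int)
    (h : ∀ i ∈ I, pvLi l i ≠ x ∧ pvQ r i ≠ x) : pvDelta l r I x = 0 := by
  revert h
  induction I with
  | nil => intro _; rfl
  | cons i t ih =>
    intro h
    obtain ⟨h1, h2⟩ := h i (by simp)
    have ht := ih (fun j hj => h j (by simp [hj]))
    unfold pvDelta at *
    simp only [List.map_cons, List.sum_cons]
    rw [if_neg h1, if_neg h2, ht]
    ring

lemma pvT_cons (x d : Int) (rest : List (Int × Int)) (y : Int) :
    pvT ((x, d) :: rest) y = (if x ≤ y then d else 0) + pvT rest y := by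
  unfold pvT
  by_cases h : x ≤ y <;> simp [h]

lemma pvT_zero (es : List (Int × Int)) (x : Int) (h : ∀ e ∈ es, x < e.1) :
    pvT es x = 0 := by
  unfold pvT
  rw [List.filter_eq_nil_iff.mpr (fun e he => by simpa using by have := h e he; omega)]
  rfl

lemma pvT_perm (es es' : List (Int × Int)) (h : es.Perm es') (x : Int) :
    pvT es x = pvT es' x := by
  unfold pvT
  exact ((h.filter _).map _).sum_eq

lemma pvT_flat (l r : List Int) (I : List Int) (x : Int) :
    pvT (pvFlat l r I) x = pvCs l r I x := by
  induction I with
  | nil => rfl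
  | cons i t ih =>
    unfold pvFlat pvT pvCs at *
    simp only [List.flatMap_cons, List.filter_append, List.map_append, List.sum_append,
      List.map_cons, List.sum_cons, ih]
    have h : ((([(pvLi l i, (1:Int)), (pvQ r i, (-1:Int))].filter
        (fun e => decide (e.1 ≤ x))).map Prod.snd).sum)
        = (if pvLi l i ≤ x then (1:Int) else 0) - (if pvQ r i ≤ x then (1:Int) else 0) := by
      by_cases h1 : pvLi l i ≤ x <;> by_cases h2 : pvQ r i ≤ x <;>
        simp [h1, h2]
    omega

-- ---------- event list construction ----------
lemma events_eq_flat (l r : List Int) (I : List Int) : ∀ acc : List (Int × Int),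
    I.foldl (fun acc i =>
      (acc ++ [(PySem.List.pyGetD l i 0, (1 : Int))]) ++ [(PySem.List.pyGetD r i 0 + 1, (-1 : Int))]) acc
    = acc ++ pvFlat l r I := by
  induction I with
  | nil => intro acc; simp [pvFlat]
  | cons i t ih =>
    intro acc
    simp only [List.foldl_cons, ih, pvFlat, List.flatMap_cons]
    simp [pvLi, pvQ]

-- ---------- coordinates of a sorted list ----------
lemma coords_mem (es : List (Int × Int)) (y : Int) (h : y ∈ pvCoords es) :
    ∃ e ∈ es, e.1 = y := by
  induction es with
  | nil => simp [pvCoords] at h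
  | cons e rest ih =>
    obtain ⟨x, d⟩ := e
    by_cases hg : pvGroupEnd x rest = true
    · simp only [pvCoords, if_pos hg, List.mem_cons] at h
      rcases h with h | h
      · exact ⟨(x, d), by simp, h.symm⟩
      · obtain ⟨e, he, hey⟩ := ih h
        exact ⟨e, by simp [he], hey⟩
    · simp only [pvCoords, if_neg hg] at h
      obtain ⟨e, he, hey⟩ := ih h
      exact ⟨e, by simp [he], hey⟩

lemma mem_coords (es : List (Int × Int))
    (hs : es.Pairwise (fun a b => a.1 ≤ b.1)) : ∀ e ∈ es, e.1 ∈ pvCoords es := by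
  induction es with
  | nil => simp
  | cons e0 rest ih =>
    intro e he
    obtain ⟨x, d⟩ := e0
    rcases List.pairwise_cons.mp hs with ⟨hhead, htail⟩
    by_cases hg : pvGroupEnd x rest = true
    · simp only [pvCoords, if_pos hg, List.mem_cons]
      rcases List.mem_cons.mp he with h | h
      · left; rw [h]
      · right; exact ih htail e h
    · -- the next event has the same coordinate x
      obtain ⟨e1, r2, hr⟩ : ∃ e1 r2, rest = e1 :: r2 := by
        cases rest with
        | nil => simp [pvGroupEnd] at hg
        | cons a b => exact ⟨a, b, rfl⟩
      have hx1 : e1.1 = x := by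
        subst hr
        simp [pvGroupEnd] at hg
        exact hg
      simp only [pvCoords, if_neg hg]
      rcases List.mem_cons.mp he with h | h
      · have : e1.1 ∈ pvCoords rest := ih htail e1 (by simp [hr])
        rw [hx1] at this
        rw [h]
        exact this
      · exact ih htail e h

lemma coords_sorted (es : List (Int × Int))
    (hs : es.Pairwise (fun a b => a.1 ≤ b.1)) : (pvCoords es).Pairwise (· < ·) := by
  induction es with
  | nil => simp [pvCoords]
  | cons e0 rest ih =>
    obtain ⟨x, d⟩ := e0
    rcases List.pairwise_cons.mp hs with ⟨hhead, htail⟩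
    by_cases hg : pvGroupEnd x rest = true
    · simp only [pvCoords, if_pos hg]
      refine List.pairwise_cons.mpr ⟨?_, ih htail⟩
      intro z hz
      obtain ⟨e, he, hez⟩ := coords_mem rest z hz
      -- every event of rest has coordinate > x
      cases rest with
      | nil => simp at he
      | cons e1 r2 =>
        have hx1 : e1.1 ≠ x := by
          by_contra hcon
          simp [pvGroupEnd, hcon] at hg
        have h1 : x ≤ e1.1 := hhead e1 (by simp)
        rcases List.pairwise_cons.mp htail with ⟨hhead2, _⟩
        rcases List.mem_cons.mp he with h | h
        · subst h; omega
        · have := hhead2 e h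
          omega
    · simp only [pvCoords, if_neg hg]
      exact ih htail

-- ---------- the sweep computes a record fold over the distinct coordinates ----------
lemma sweep_spec (maxx : Int) (es : List (Int × Int))
    (hs : es.Pairwise (fun a b => a.1 ≤ b.1)) : ∀ cur best ans : Int,
    pvSweep maxx es cur best ans
      = ((pvCoords es).foldl (pvStep maxx (fun x => cur + pvT es x)) (best, ans)).2 := by
  induction es with
  | nil => intro cur best ans; rfl
  | cons e0 rest ih =>
    intro cur best ans
    obtain ⟨x, d⟩ := e0
    rcases List.pairwise_cons.mp hs with ⟨hhead, htail⟩
    have ihr := ih htail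
    by_cases hg : pvGroupEnd x rest = true
    · -- last event of the group at coordinate x
      have hgt : ∀ e ∈ rest, x < e.1 := by
        intro e he
        cases rest with
        | nil => simp at he
        | cons e1 r2 =>
          have hx1 : e1.1 ≠ x := by
            by_contra hcon
            simp [pvGroupEnd, hcon] at hg
          have h1 : x ≤ e1.1 := hhead e1 (by simp)
          rcases List.mem_cons.mp he with h | h
          · subst h; omega
          · have := (List.pairwise_cons.mp htail).1 e h
            omega
      have hcongr : ∀ st : Int × Int, ∀ y ∈ pvCoords rest,
          pvStep maxx (fun z => cur + pvT ((x, d) :: rest) z) st y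
            = pvStep maxx (fun z => (cur + d) + pvT rest z) st y := by
        intro st y hy
        obtain ⟨e, he, hey⟩ := coords_mem rest y hy
        have hxy : x ≤ y := le_of_lt (hey ▸ hgt e he)
        unfold pvStep
        simp only [pvT_cons, if_pos hxy]
        rw [← add_assoc]
      simp only [pvCoords, if_pos hg, List.foldl_cons]
      rw [PySem.List.foldl_congr_mem _ _ _ _ hcongr]
      have hstep : pvStep maxx (fun z => cur + pvT ((x, d) :: rest) z) (best, ans) x
          = if 0 ≤ x ∧ x ≤ maxx ∧ best < cur + d then (cur + d, x) else (best, ans) := by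
        unfold pvStep
        simp only [pvT_cons, if_pos (le_refl x), pvT_zero rest x hgt, add_zero]
      rw [hstep]
      simp only [pvSweep, hg, Bool.true_and]
      by_cases hc : 0 ≤ x ∧ x ≤ maxx ∧ best < cur + d
      · rw [if_pos hc]
        have hb' : (decide (0 ≤ x) && decide (x ≤ maxx) && decide (best < cur + d)) = true := by
          simp [hc.1, hc.2.1, hc.2.2]
        rw [hb', if_pos rfl]
        exact ihr (cur + d) (cur + d) x
      · rw [if_neg hc]
        have hb' : (decide (0 ≤ x) && decide (x ≤ maxx) && decide (best < cur + d)) = false := by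
          rw [Bool.and_eq_false_iff]
          by_cases h1 : 0 ≤ x
          · by_cases h2 : x ≤ maxx
            · right; simp only [decide_eq_false_iff_not, not_lt]; omega
            · left; rw [Bool.and_eq_false_iff]; right; simpa using h2
          · left; rw [Bool.and_eq_false_iff]; left; simpa using h1
        rw [hb']
        simp only [Bool.false_eq_true, if_false]
        exact ihr (cur + d) best ans
    · -- more events at the same coordinate follow
      obtain ⟨e1, r2, hr⟩ : ∃ e1 r2, rest = e1 :: r2 := by
        cases rest with
        | nil => simp [pvGroupEnd] at hg
        | cons a b => exact ⟨a, b, rfl⟩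
      have hx1 : e1.1 = x := by
        subst hr
        simp [pvGroupEnd] at hg
        exact hg
      have hcongr : ∀ st : Int × Int, ∀ y ∈ pvCoords rest,
          pvStep maxx (fun z => cur + pvT ((x, d) :: rest) z) st y
            = pvStep maxx (fun z => (cur + d) + pvT rest z) st y := by
        intro st y hy
        obtain ⟨e, he, hey⟩ := coords_mem rest y hy
        have hxy : x ≤ y := by
          subst hr
          rcases List.mem_cons.mp he with h | h
          · subst h; rw [hey] at hx1; omega
          · have h1 : x ≤ e1.1 := hhead e1 (by simp)
            have := (List.pairwise_cons.mp htail).1 e h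
            omega
        unfold pvStep
        simp only [pvT_cons, if_pos hxy]
        rw [← add_assoc]
      simp only [pvCoords, if_neg hg]
      rw [PySem.List.foldl_congr_mem _ _ _ _ hcongr]
      simp only [pvSweep, hg, Bool.false_and, Bool.false_eq_true, if_false]
      exact ihr (cur + d) best ans

-- ---------- generic fold helpers ----------
lemma foldl_id {α : Type} (f : (Int × Int) → α → (Int × Int)) (D : List α) (st : Int × Int)
    (h : ∀ st' x, x ∈ D → f st' x = st') : D.foldl f st = st := by
  induction D generalizing st with
  | nil => rfl
  | cons a t ih =>
    simp only [List.foldl_cons]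
    rw [h st a (by simp)]
    exact ih st (fun st' x hx => h st' x (by simp [hx]))

lemma foldl_filter_id (f : (Int × Int) → Int → (Int × Int)) (p : Int → Bool) (D : List Int)
    (h : ∀ st x, x ∈ D → p x = false → f st x = st) :
    ∀ st, D.foldl f st = (D.filter p).foldl f st := by
  induction D with
  | nil => intro st; rfl
  | cons a t ih =>
    intro st
    have iht := ih (fun st x hx hp => h st x (by simp [hx]) hp)
    by_cases hp : p a = true
    · simp only [List.foldl_cons, List.filter_cons, hp, if_pos trivial]
      exact iht _
    · simp only [List.foldl_cons, List.filter_cons, Bool.not_eq_true] at *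
      rw [h st a (by simp) (by simpa using hp)]
      simp [hp]
      exact iht _

lemma filter_lt_succ (D : List Int) (hD : D.Pairwise (· < ·)) (m : Int) :
    (m ∈ D → D.filter (fun x => decide (x < m + 1)) = D.filter (fun x => decide (x < m)) ++ [m])
    ∧ (m ∉ D → D.filter (fun x => decide (x < m + 1)) = D.filter (fun x => decide (x < m))) := by
  induction D with
  | nil => exact ⟨by simp, by simp⟩
  | cons a t ih =>
    rcases List.pairwise_cons.mp hD with ⟨hhead, htail⟩
    have iht := ih htail
    rcases lt_trichotomy a m with hlt | heq | hgt
    · constructor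
      · intro hm
        have hm' : m ∈ t := by
          rcases List.mem_cons.mp hm with h | h
          · omega
          · exact h
        simp only [List.filter_cons, decide_eq_true_eq]
        rw [if_pos (by omega), if_pos (by omega)]
        rw [iht.1 hm']
        simp
      · intro hm
        have hm' : m ∉ t := fun h => hm (by simp [h])
        simp only [List.filter_cons, decide_eq_true_eq]
        rw [if_pos (by omega), if_pos (by omega), iht.2 hm']
    · -- a = m : everything after a is > m
      subst heq
      have hall : ∀ x ∈ t, ¬ (x < a + 1) := fun x hx => by have := hhead x hx; omega
      have h1 : t.filter (fun x => decide (x < a + 1)) = [] :=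
        List.filter_eq_nil_iff.mpr (fun x hx => by simpa using hall x hx)
      have h2 : t.filter (fun x => decide (x < a)) = [] :=
        List.filter_eq_nil_iff.mpr (fun x hx => by have := hhead x hx; simp; omega)
      constructor
      · intro _
        simp only [List.filter_cons, decide_eq_true_eq]
        rw [if_pos (by omega), if_neg (by omega), h1, h2]
        simp
      · intro hm
        exact absurd (by simp) hm
    · -- a > m : all elements ≥ a > m
      have h1 : (a :: t).filter (fun x => decide (x < m + 1)) = [] :=
        List.filter_eq_nil_iff.mpr (fun x hx => by
          rcases List.mem_cons.mp hx with h | h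
          · simp; omega
          · have := hhead x h; simp; omega)
      have h2 : (a :: t).filter (fun x => decide (x < m)) = [] :=
        List.filter_eq_nil_iff.mpr (fun x hx => by
          rcases List.mem_cons.mp hx with h | h
          · simp; omega
          · have := hhead x h; simp; omega)
      constructor
      · intro hm
        rcases List.mem_cons.mp hm with h | h
        · omega
        · have := hhead m h; omega
      · intro _
        rw [h1, h2]

-- ---------- the skip lemma: the full 0..maxx fold equals the fold over coordinates ----------
lemma skip_lemma (maxx : Int) (Cf : Int → Int) (D : List Int)
    (hD : D.Pairwise (· < ·)) (h0 : ∀ x ∈ D, 0 ≤ x)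
    (hjump : ∀ x : Int, 0 ≤ x → x ∉ D → Cf x = Cf (x - 1)) (hneg : Cf (-1) = 0) :
    ∀ m : Nat,
      (PySem.List.pyRange 0 (m:Int) 1).foldl (pvStep maxx Cf) (0, -1)
        = (D.filter (fun x => decide (x < (m:Int)))).foldl (pvStep maxx Cf) (0, -1)
      ∧ 0 ≤ ((PySem.List.pyRange 0 (m:Int) 1).foldl (pvStep maxx Cf) (0, -1)).1
      ∧ ∀ y : Int, 0 ≤ y → y < (m:Int) → y ≤ maxx →
          Cf y ≤ ((PySem.List.pyRange 0 (m:Int) 1).foldl (pvStep maxx Cf) (0, -1)).1 := by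
  intro m
  induction m with
  | zero =>
    have hr : PySem.List.pyRange 0 ((0:Nat):Int) 1 = [] :=
      PySem.List.pyRange_one_eq_nil (by norm_num)
    have hf : D.filter (fun x => decide (x < ((0:Nat):Int))) = [] :=
      List.filter_eq_nil_iff.mpr (fun x hx => by have := h0 x hx; simp; omega)
    refine ⟨by rw [hr, hf], by rw [hr]; norm_num, ?_⟩
    intro y hy0 hym _
    norm_num at hym
    omega
  | succ k ihk =>
    obtain ⟨heq, hpos, hinv⟩ := ihk
    have hstep_le : ∀ (st : Int × Int) (x : Int), st.1 ≤ (pvStep maxx Cf st x).1 := by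
      intro st x
      unfold pvStep
      split_ifs with h
      · exact le_of_lt h.2.2
      · exact le_rfl
    have hcast : ((k + 1 : Nat) : Int) = (k : Int) + 1 := by push_cast; ring
    have hrange : PySem.List.pyRange 0 ((k + 1 : Nat) : Int) 1
        = PySem.List.pyRange 0 (k : Int) 1 ++ [(k : Int)] := by
      rw [hcast, PySem.List.pyRange_one_succ_right (by positivity)]
    set A := (PySem.List.pyRange 0 (k : Int) 1).foldl (pvStep maxx Cf) (0, -1) with hA
    have hout : (PySem.List.pyRange 0 ((k + 1 : Nat) : Int) 1).foldl (pvStep maxx Cf) (0, -1)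
        = pvStep maxx Cf A (k : Int) := by
      rw [hrange, List.foldl_append, List.foldl_cons, List.foldl_nil]
    by_cases hmem : (k : Int) ∈ D
    · have hfil : D.filter (fun x => decide (x < ((k + 1 : Nat) : Int)))
          = D.filter (fun x => decide (x < (k : Int))) ++ [(k : Int)] := by
        rw [hcast]
        exact (filter_lt_succ D hD (k : Int)).1 hmem
      refine ⟨?_, ?_, ?_⟩
      · rw [hout, hfil, List.foldl_append, List.foldl_cons, List.foldl_nil, ← heq]
      · rw [hout]
        exact le_trans hpos (hstep_le A (k : Int))
      · intro y hy0 hyk hym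
        rw [hout]
        rcases lt_or_eq_of_le (by omega : y ≤ (k : Int)) with hlt | heqy
        · exact le_trans (hinv y hy0 (by omega) hym) (hstep_le A (k : Int))
        · subst heqy
          unfold pvStep
          by_cases hlt : A.1 < Cf ((k : Nat) : Int)
          · rw [if_pos ⟨hy0, hym, hlt⟩]
          · rw [if_neg (by tauto)]
            omega
    · have hfil : D.filter (fun x => decide (x < ((k + 1 : Nat) : Int)))
          = D.filter (fun x => decide (x < (k : Int))) := by
        rw [hcast]
        exact (filter_lt_succ D hD (k : Int)).2 hmem
      have hCfk : (k : Int) ≤ maxx → Cf (k : Int) ≤ A.1 := by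
        intro hkm
        have hj := hjump (k : Int) (by positivity) hmem
        rcases Nat.eq_zero_or_pos k with hk0 | hkpos
        · subst hk0
          rw [hj]
          norm_num
          rw [hneg]
          exact hpos
        · rw [hj]
          exact hinv ((k : Int) - 1) (by omega) (by omega) (by omega)
      have hid : pvStep maxx Cf A (k : Int) = A := by
        unfold pvStep
        by_cases hkm : (k : Int) ≤ maxx
        · rw [if_neg (by have := hCfk hkm; intro hcon; exact absurd hcon.2.2 (by omega))]
        · rw [if_neg (by tauto)]
      refine ⟨?_, ?_, ?_⟩
      · rw [hout, hfil, hid, heq]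
      · rw [hout, hid]
        exact hpos
      · intro y hy0 hyk hym
        rw [hout, hid]
        rcases lt_or_eq_of_le (by omega : y ≤ (k : Int)) with hlt | heqy
        · exact hinv y hy0 (by omega) hym
        · subst heqy
          exact hCfk hym

-- ---------- A side: the frequency array ----------
lemma getD_setD (f : List Int) (p x : Int) (v : Int) (hp0 : 0 ≤ p) (hx0 : 0 ≤ x)
    (hpl : p < (f.length : Int)) :
    PySem.List.pyGetD (PySem.List.pySetD f p v) x 0 = if x = p then v else PySem.List.pyGetD f x 0 := by
  have hp : p = ((p.toNat : Nat) : Int) := by omega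
  have hx : x = ((x.toNat : Nat) : Int) := by omega
  rw [hp, hx, PySem.List.pyGetD_pySetD_natCast f p.toNat x.toNat v 0 (by omega)]
  by_cases h : x = p
  · rw [if_pos (by omega), if_pos (by rw [← hx, ← hp]; exact h)]
  · rw [if_neg (by omega), if_neg (by rw [← hx, ← hp]; exact h), ← hx]

lemma freq_get (l r : List Int) (maxx : Int) (I : List Int) (hb : ∀ i ∈ I, pvInB l r maxx i) :
    ∀ f : List Int, (f.length : Int) = maxx + 2 → ∀ x : Int, 0 ≤ x → x ≤ maxx + 1 →
    PySem.List.pyGetD (I.foldl (fun f i =>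
      let p := PySem.List.pyGetD l i 0
      let f := PySem.List.pySetD f p (PySem.List.pyGetD f p 0 + 1)
      let q := PySem.List.pyGetD r i 0 + 1
      PySem.List.pySetD f q (PySem.List.pyGetD f q 0 - 1)) f) x 0
      = PySem.List.pyGetD f x 0 + pvDelta l r I x := by
  revert hb
  induction I with
  | nil =>
    intro _ f _ x _ _
    unfold pvDelta
    simp
  | cons i t ih =>
    intro hb f hlen x hx0 hx1
    obtain ⟨hp0, hp1, hq0, hq1⟩ := hb i (by simp)
    have hbt : ∀ j ∈ t, pvInB l r maxx j := fun j hj => hb j (by simp [hj])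
    simp only [List.foldl_cons]
    have hlen1 : ((PySem.List.pySetD f (PySem.List.pyGetD l i 0)
        (PySem.List.pyGetD f (PySem.List.pyGetD l i 0) 0 + 1)).length : Int) = maxx + 2 := by
      rw [PySem.List.length_pySetD]; exact hlen
    have hlen2 : ((PySem.List.pySetD (PySem.List.pySetD f (PySem.List.pyGetD l i 0)
        (PySem.List.pyGetD f (PySem.List.pyGetD l i 0) 0 + 1)) (PySem.List.pyGetD r i 0 + 1)
        (PySem.List.pyGetD (PySem.List.pySetD f (PySem.List.pyGetD l i 0)
          (PySem.List.pyGetD f (PySem.List.pyGetD l i 0) 0 + 1)) (PySem.List.pyGetD r i 0 + 1) 0 - 1)).length : Int)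
        = maxx + 2 := by
      rw [PySem.List.length_pySetD]; exact hlen1
    rw [ih hbt _ hlen2 x hx0 hx1]
    have e1 : ∀ y : Int, 0 ≤ y →
        PySem.List.pyGetD (PySem.List.pySetD f (PySem.List.pyGetD l i 0)
          (PySem.List.pyGetD f (PySem.List.pyGetD l i 0) 0 + 1)) y 0
        = if y = pvLi l i then PySem.List.pyGetD f (pvLi l i) 0 + 1 else PySem.List.pyGetD f y 0 := by
      intro y hy
      exact getD_setD f (PySem.List.pyGetD l i 0) y _ (by exact hp0) hy (by unfold pvLi at hp1; omega)
    have e2 : PySem.List.pyGetD (PySem.List.pySetD (PySem.List.pySetD f (PySem.List.pyGetD l i 0)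
          (PySem.List.pyGetD f (PySem.List.pyGetD l i 0) 0 + 1)) (PySem.List.pyGetD r i 0 + 1)
          (PySem.List.pyGetD (PySem.List.pySetD f (PySem.List.pyGetD l i 0)
            (PySem.List.pyGetD f (PySem.List.pyGetD l i 0) 0 + 1)) (PySem.List.pyGetD r i 0 + 1) 0 - 1)) x 0
        = if x = pvQ r i
          then (if pvQ r i = pvLi l i then PySem.List.pyGetD f (pvLi l i) 0 + 1 else PySem.List.pyGetD f (pvQ r i) 0) - 1
          else (if x = pvLi l i then PySem.List.pyGetD f (pvLi l i) 0 + 1 else PySem.List.pyGetD f x 0) := by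
      rw [getD_setD _ (PySem.List.pyGetD r i 0 + 1) x _ (by unfold pvQ at hq0; omega) hx0
          (by rw [show ((PySem.List.pySetD f (PySem.List.pyGetD l i 0)
            (PySem.List.pyGetD f (PySem.List.pyGetD l i 0) 0 + 1)).length : Int) = maxx + 2 from hlen1]
              unfold pvQ at hq1; omega)]
      rw [e1 _ (by unfold pvQ at hq0; omega), e1 x hx0]
      rfl
    rw [e2]
    unfold pvDelta
    simp only [List.map_cons, List.sum_cons]
    by_cases hxq : x = pvQ r i
    · by_cases hql : pvQ r i = pvLi l i
      · rw [if_pos hxq, if_pos hql, if_pos (by omega), if_pos (by omega)]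
        rw [show PySem.List.pyGetD f (pvLi l i) 0 = PySem.List.pyGetD f (pvQ r i) 0 from by rw [hql]]
        rw [show PySem.List.pyGetD f x 0 = PySem.List.pyGetD f (pvQ r i) 0 from by rw [hxq]]
        omega
      · rw [if_pos hxq, if_neg hql, if_neg (by omega), if_pos (by omega)]
        rw [show PySem.List.pyGetD f x 0 = PySem.List.pyGetD f (pvQ r i) 0 from by rw [hxq]]
        omega
    · by_cases hxl : x = pvLi l i
      · rw [if_neg hxq, if_pos hxl, if_pos (by omega), if_neg (by omega)]
        rw [show PySem.List.pyGetD f x 0 = PySem.List.pyGetD f (pvLi l i) 0 from by rw [hxl]]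
        omega
      · rw [if_neg hxq, if_neg hxl, if_neg (by omega), if_neg (by omega)]
        omega

-- ---------- coordinate bounds of the event list ----------
lemma flat_coord_bounds (l r : List Int) (maxx : Int) (I : List Int)
    (hb : ∀ i ∈ I, pvInB l r maxx i) :
    ∀ e ∈ pvFlat l r I, 0 ≤ e.1 ∧ e.1 ≤ maxx + 1 := by
  intro e he
  unfold pvFlat at he
  rw [List.mem_flatMap] at he
  obtain ⟨i, hi, hei⟩ := he
  obtain ⟨h1, h2, h3, h4⟩ := hb i hi
  rcases List.mem_cons.mp hei with h | h
  · subst h; exact ⟨h1, h2⟩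
  · rcases List.mem_cons.mp h with h' | h'
    · subst h'; exact ⟨h3, h4⟩
    · simp at h'

lemma mem_flat_l (l r : List Int) (I : List Int) (i : Int) (hi : i ∈ I) :
    (pvLi l i, (1:Int)) ∈ pvFlat l r I := by
  unfold pvFlat
  rw [List.mem_flatMap]
  exact ⟨i, hi, by simp⟩

lemma mem_flat_q (l r : List Int) (I : List Int) (i : Int) (hi : i ∈ I) :
    (pvQ r i, (-1:Int)) ∈ pvFlat l r I := by
  unfold pvFlat
  rw [List.mem_flatMap]
  exact ⟨i, hi, by simp⟩

-- ---------- A side: the scan loop ----------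
lemma scan_spec (l r : List Int) (maxx : Int) (I : List Int) (F : List Int)
    (hF : ∀ x : Int, 0 ≤ x → x ≤ maxx + 1 → PySem.List.pyGetD F x 0 = pvDelta l r I x)
    (hneg : pvCs l r I (-1) = 0) :
    ∀ m : Nat, (m : Int) ≤ maxx + 1 →
    (PySem.List.pyRange 0 (m:Int) 1).foldl (fun (st : Int × Int × Int) i =>
        let c := st.2.2 + PySem.List.pyGetD F i 0
        if st.1 < c then (c, i, c) else (st.1, st.2.1, c)) (0, -1, 0)
    = (((PySem.List.pyRange 0 (m:Int) 1).foldl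
          (fun (st : Int × Int) x => if st.1 < pvCs l r I x then (pvCs l r I x, x) else st) (0, -1)).1,
       ((PySem.List.pyRange 0 (m:Int) 1).foldl
          (fun (st : Int × Int) x => if st.1 < pvCs l r I x then (pvCs l r I x, x) else st) (0, -1)).2,
       pvCs l r I ((m:Int) - 1)) := by
  intro m
  induction m with
  | zero =>
    intro _
    have hr : PySem.List.pyRange 0 ((0:Nat):Int) 1 = [] :=
      PySem.List.pyRange_one_eq_nil (by norm_num)
    rw [hr]
    simp only [List.foldl_nil]
    rw [show ((0:Nat):Int) - 1 = -1 by norm_num, hneg]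
  | succ k ih =>
    intro hk1
    have hkb : ((k:Nat):Int) ≤ maxx + 1 := by push_cast at hk1 ⊢; omega
    have hkm : ((k:Nat):Int) ≤ maxx := by push_cast at hk1 ⊢; omega
    have hcast : ((k + 1 : Nat) : Int) = (k : Int) + 1 := by push_cast; ring
    have hrange : PySem.List.pyRange 0 ((k + 1 : Nat) : Int) 1
        = PySem.List.pyRange 0 (k : Int) 1 ++ [(k : Int)] := by
      rw [hcast, PySem.List.pyRange_one_succ_right (by positivity)]
    rw [hrange, List.foldl_append, List.foldl_append, List.foldl_cons, List.foldl_cons,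
      List.foldl_nil, List.foldl_nil, ih hkb]
    have hc : pvCs l r I ((k:Int) - 1) + PySem.List.pyGetD F (k:Int) 0 = pvCs l r I (k:Int) := by
      rw [hF (k:Int) (by positivity) hkb, ← pvCs_succ]
    simp only
    rw [hc]
    have hrw : ((k + 1 : Nat) : Int) - 1 = (k : Int) := by push_cast; ring
    rw [hrw]
    by_cases hlt : ((PySem.List.pyRange 0 (k:Int) 1).foldl
        (fun (st : Int × Int) x => if st.1 < pvCs l r I x then (pvCs l r I x, x) else st) (0, -1)).1
        < pvCs l r I (k:Int)
    · rw [if_pos hlt, if_pos hlt]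
    · rw [if_neg hlt, if_neg hlt]

-- ===== VERDICT (by name: the statement is the Claim_ definition above) =====
theorem maxOccured_spec : Claim_equal_maxOccured := by
  intro n l r maxx hdom hpre
  obtain ⟨hln, hrn, hb⟩ := hpre
  unfold Spec_maxOccured
  set I := PySem.List.pyRange 0 n 1 with hI
  have hbI : ∀ i ∈ I, pvInB l r maxx i := by
    intro i hi
    obtain ⟨h1, h2, h3, h4⟩ := hb i hi
    exact ⟨h1, h2, by unfold pvQ; omega, by unfold pvQ; omega⟩
  -- name the pieces of B
  have hBev : (I.foldl (fun acc i =>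
      (acc ++ [(PySem.List.pyGetD l i 0, (1 : Int))]) ++ [(PySem.List.pyGetD r i 0 + 1, (-1 : Int))]) [])
      = pvFlat l r I := by
    simpa using events_eq_flat l r I []
  set es := PySem.List.sorted (pvFlat l r I) (fun e => e.1) false with hes
  have hperm : es.Perm (pvFlat l r I) := PySem.List.sorted_perm _ _ _
  have hs : es.Pairwise (fun a b => a.1 ≤ b.1) := PySem.List.sorted_pairwise _ _
  have hCf : (fun x => 0 + pvT es x) = pvCs l r I := by
    funext x
    rw [zero_add, pvT_perm es (pvFlat l r I) hperm, pvT_flat]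
  have hB : maxOccured_alt n l r maxx
      = ((pvCoords es).foldl (pvStep maxx (pvCs l r I)) (0, -1)).2 := by
    show pvSweep maxx (PySem.List.sorted ((PySem.List.pyRange 0 n 1).foldl _ []) _ false) 0 0 (-1) = _
    rw [← hI, hBev, ← hes, sweep_spec maxx es hs 0 0 (-1), hCf]
  set D := pvCoords es with hD
  have hDmem : ∀ x ∈ D, 0 ≤ x ∧ x ≤ maxx + 1 := by
    intro x hx
    obtain ⟨e, he, hex⟩ := coords_mem es x hx
    have := flat_coord_bounds l r maxx I hbI e (hperm.mem_iff.mp he)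
    omega
  have hD0 : ∀ x ∈ D, 0 ≤ x := fun x hx => (hDmem x hx).1
  have hDlt : D.Pairwise (· < ·) := coords_sorted es hs
  have hjump : ∀ x : Int, 0 ≤ x → x ∉ D → pvCs l r I x = pvCs l r I (x - 1) := by
    intro x hx0 hxD
    have hz : ∀ i ∈ I, pvLi l i ≠ x ∧ pvQ r i ≠ x := by
      intro i hi
      constructor
      · intro hcon
        apply hxD
        have : (pvLi l i, (1:Int)) ∈ es := hperm.mem_iff.mpr (mem_flat_l l r I i hi)
        simpa [hcon] using mem_coords es hs _ this
      · intro hcon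
        apply hxD
        have : (pvQ r i, (-1:Int)) ∈ es := hperm.mem_iff.mpr (mem_flat_q l r I i hi)
        simpa [hcon] using mem_coords es hs _ this
    rw [pvCs_succ l r I x, pvDelta_zero l r I x hz, add_zero]
  have hneg : pvCs l r I (-1) = 0 := pvCs_neg l r maxx I hbI
  by_cases hmx : 0 ≤ maxx + 1
  · -- main case
    set M : Nat := (maxx + 1).toNat with hM
    have hMI : ((M : Nat) : Int) = maxx + 1 := by omega
    have hFlen : ((List.replicate (maxx + 2).toNat (0:Int)).length : Int) = maxx + 2 := by
      simp; omega
    have hFget := freq_get l r maxx I hbI (List.replicate (maxx + 2).toNat 0) hFlen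
    have hFget' : ∀ x : Int, 0 ≤ x → x ≤ maxx + 1 →
        PySem.List.pyGetD (I.foldl (fun f i =>
          let p := PySem.List.pyGetD l i 0
          let f := PySem.List.pySetD f p (PySem.List.pyGetD f p 0 + 1)
          let q := PySem.List.pyGetD r i 0 + 1
          PySem.List.pySetD f q (PySem.List.pyGetD f q 0 - 1)) (List.replicate (maxx + 2).toNat 0)) x 0
        = pvDelta l r I x := by
      intro x hx0 hx1
      rw [hFget x hx0 hx1]
      have : PySem.List.pyGetD (List.replicate (maxx + 2).toNat (0:Int)) x 0 = 0 := by
        rw [PySem.List.pyGetD_of_nonneg _ _ hx0]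
        simp [List.getD, List.getElem?_replicate]
        split <;> rfl
      rw [this, zero_add]
    have hA : maxOccured n l r maxx
        = (((PySem.List.pyRange 0 ((M:Nat):Int) 1).foldl
            (fun (st : Int × Int) x => if st.1 < pvCs l r I x then (pvCs l r I x, x) else st) (0, -1))).2 := by
      show (((PySem.List.pyRange 0 (maxx+1) 1).foldl _ (((0:Int), (-1:Int), (0:Int)) : Int × Int × Int))).2.1 = _
      rw [show PySem.List.pyRange 0 (maxx+1) 1 = PySem.List.pyRange 0 ((M:Nat):Int) 1 by rw [hMI]]
      rw [← hI, scan_spec l r maxx I _ hFget' hneg M (by omega)]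
    -- guardify the A-side fold
    have hguard : (PySem.List.pyRange 0 ((M:Nat):Int) 1).foldl
          (fun (st : Int × Int) x => if st.1 < pvCs l r I x then (pvCs l r I x, x) else st) (0, -1)
        = (PySem.List.pyRange 0 ((M:Nat):Int) 1).foldl (pvStep maxx (pvCs l r I)) (0, -1) := by
      apply PySem.List.foldl_congr_mem
      intro st x hx
      rw [PySem.List.mem_pyRange_one] at hx
      unfold pvStep
      have h1 : 0 ≤ x := hx.1
      have h2 : x ≤ maxx := by omega
      by_cases hlt : st.1 < pvCs l r I x
      · rw [if_pos hlt, if_pos ⟨h1, h2, hlt⟩]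
      · rw [if_neg hlt, if_neg (by tauto)]
    have hskip := (skip_lemma maxx (pvCs l r I) D hDlt hD0 hjump hneg M).1
    have hfilt : D.foldl (pvStep maxx (pvCs l r I)) (0, -1)
        = (D.filter (fun x => decide (x < ((M:Nat):Int)))).foldl (pvStep maxx (pvCs l r I)) (0, -1) := by
      apply foldl_filter_id
      intro st x hx hpx
      have hx1 := hDmem x hx
      have : ¬ x < maxx + 1 := by simpa [hMI] using hpx
      unfold pvStep
      rw [if_neg (by omega)]
    rw [hA, hB, hguard, hskip, ← hfilt]
  · -- maxx + 1 < 0 : the scan range is empty and every coordinate is rejected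
    have hA : maxOccured n l r maxx = -1 := by
      show (((PySem.List.pyRange 0 (maxx+1) 1).foldl _ (((0:Int), (-1:Int), (0:Int)) : Int × Int × Int))).2.1 = _
      rw [show PySem.List.pyRange 0 (maxx + 1) 1 = [] from PySem.List.pyRange_one_eq_nil (by omega)]
      rfl
    have hBv : maxOccured_alt n l r maxx = -1 := by
      rw [hB, foldl_id]
      intro st x hx
      have := hDmem x hx
      unfold pvStep
      rw [if_neg (by omega)]
    rw [hA, hBv]
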